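-- pv_equiv track=rewrite | github.com/DivJacob/word-search-db | main.py | generate_vector
-- ===== SOURCE A (Python) =====
-- def generate_vector(word, type):
--     arr = [0] * 26
--     if type == 1: # Word Frequency Vector
--         for letter in word:
--             if letter not in "qazxswedcvfrtgbnhyujmikolp":
--                 continue
--             indx = ord(letter)-ord('a')
--             arr[indx] += 1
--     else: # Ascii Vector
--         indx = 0
--         for letter in word:
--             if letter not in "qazxswedcvfrtgbnhyujmikolp":
--                 continue
--             arr[indx] = ord(letter)-ord('a')
--             indx += 1
--             if indx == 26:
--                 break
--     return arr
-- ===== SOURCE B (Python) =====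
-- KBD = "qazxswedcvfrtgbnhyujmikolp"
--
-- def _fill(chars, slots):
--     # recursively lay down the next letter code, padding the tail with zeros;
--     # skip to the next valid letter with a loop so recursion depth is at most 26
--     if slots == 0:
--         return []
--     i = 0
--     while i < len(chars) and chars[i] not in KBD:
--         i += 1
--     if i == len(chars):
--         return [0] * slots
--     return [ord(chars[i]) - 97] + _fill(chars[i + 1:], slots - 1)
--
-- def generate_vector(word, type):
--     if type == 1:  # one independent scan per target letter, no accumulator
--         letters = list(word)
--         return [letters.count(chr(97 + i)) for i in range(26)]
--     return _fill(list(word), 26)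
-- ===== Notes on version B (the rewrite author's own statement) =====
-- stated objective: alternative
-- what changed: Type-1 branch does 26 independent list.count scans (one per target letter) instead of one accumulating array pass, and the ascii branch becomes a recursive function that builds the output list front-to-back with zero padding instead of writing into a preallocated array with a running index and break.
import Mathlib
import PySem

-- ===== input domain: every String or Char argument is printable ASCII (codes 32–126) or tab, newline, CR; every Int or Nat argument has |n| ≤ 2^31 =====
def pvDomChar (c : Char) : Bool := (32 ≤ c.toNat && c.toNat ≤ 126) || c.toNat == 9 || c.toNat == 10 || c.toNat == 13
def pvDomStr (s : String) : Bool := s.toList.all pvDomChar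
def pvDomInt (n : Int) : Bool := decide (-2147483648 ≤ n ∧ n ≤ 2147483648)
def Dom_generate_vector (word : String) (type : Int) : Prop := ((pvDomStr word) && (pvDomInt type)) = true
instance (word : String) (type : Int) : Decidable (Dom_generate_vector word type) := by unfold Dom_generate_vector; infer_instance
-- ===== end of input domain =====

-- B replaces A's accumulating array passes by 26 independent per-letter count scans (type 1)
-- and a recursive front-to-back list builder with zero padding (else): alternative, same result.

-- the membership string both versions test letters against (all 26 lowercase letters, keyboard order)
def pvKbd : List Char := "qazxswedcvfrtgbnhyujmikolp".toList

-- ===== PORT A =====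
-- type == 1 loop: for letter in word: if letter in kbd: arr[ord(letter)-ord('a')] += 1
def pvA1 : List Char → List Int → List Int
  | [], arr => arr
  | c :: rest, arr =>
    if !(PySem.Chars.isIn [c] pvKbd) then pvA1 rest arr
    else
      let indx : Int := (c.toNat : Int) - 97
      pvA1 rest (PySem.List.pySetD arr indx (PySem.List.pyGetD arr indx 0 + 1))

-- else loop: positional fill with running indx and break at 26
def pvA2 : List Char → List Int → Int → List Int
  | [], arr, _ => arr
  | c :: rest, arr, indx =>
    if !(PySem.Chars.isIn [c] pvKbd) then pvA2 rest arr indx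
    else
      let arr' := PySem.List.pySetD arr indx ((c.toNat : Int) - 97)
      let indx' := indx + 1
      if indx' = 26 then arr' else pvA2 rest arr' indx'

def generate_vector (word : String) (type : Int) : List Int :=
  if type = 1 then pvA1 word.toList (List.replicate 26 0)
  else pvA2 word.toList (List.replicate 26 0) 0

-- ===== PORT B =====
-- the while loop of _fill: advance past invalid chars (returns chars from the first valid one)
def pvSkip : List Char → List Char
  | [] => []
  | c :: rest => if PySem.Chars.isIn [c] pvKbd then c :: rest else pvSkip rest

-- _fill(chars, slots): recursive front-to-back builder with zero padding, depth ≤ 26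
def pvFill (cs : List Char) : Nat → List Int
  | 0 => []
  | n + 1 =>
    match pvSkip cs with
    | [] => List.replicate (n + 1) 0
    | c :: rest => ((c.toNat : Int) - 97) :: pvFill rest n

def generate_vector_alt (word : String) (type : Int) : List Int :=
  if type = 1 then
    -- letters = list(word); [letters.count(chr(97 + i)) for i in range(26)]
    let letters := word.toList
    (PySem.List.pyRange 0 26).map
      (fun i => (PySem.List.count letters (Char.ofNat (97 + i).toNat) : Int))
  else pvFill word.toList 26

-- ===== PRECONDITION & SPEC =====
def Spec_generate_vector (word : String) (type : Int) (out : List Int) : Prop := out = generate_vector_alt word type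
instance (word : String) (type : Int) (out : List Int) : Decidable (Spec_generate_vector word type out) := by unfold Spec_generate_vector; infer_instance

-- ===== CLAIM (what is proved, stated in full; the proofs are below) =====
def Claim_equal_generate_vector : Prop := ∀ (word : String) (type : Int), Dom_generate_vector word type → Spec_generate_vector word type (generate_vector word type)

-- ===== LEMMAS AND PROOFS =====

lemma pvIsIn_singleton (c : Char) (s : List Char) : PySem.Chars.isIn [c] s = true ↔ c ∈ s := by
  rw [PySem.Chars.isIn_iff_infix]; exact List.singleton_infix_iff c s

lemma pvMem_kbd (c : Char) : c ∈ pvKbd ↔ 97 ≤ c.toNat ∧ c.toNat ≤ 122 := by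
  have hk : pvKbd = ['q','a','z','x','s','w','e','d','c','v','f','r','t','g','b','n','h','y','u','j','m','i','k','o','l','p'] := by rfl
  constructor
  · intro h; rw [hk] at h; fin_cases h <;> decide
  · rintro ⟨h1, h2⟩
    have hc : c = Char.ofNat c.toNat := (Char.ofNat_toNat c).symm
    rw [hc, hk]; interval_cases h : c.toNat <;> decide

lemma pvToNat_ofNat (i : Nat) (h : i < 26) : (Char.ofNat (97 + i)).toNat = 97 + i := by
  interval_cases i <;> decide

lemma pvOfNat_mem_kbd (i : Nat) (h : i < 26) : Char.ofNat (97 + i) ∈ pvKbd := by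
  rw [pvMem_kbd, pvToNat_ofNat i h]; omega

-- A's frequency loop computes, at index i, the count of the i-th lowercase letter
lemma pvA1_eq (cs : List Char) : ∀ arr : List Int, arr.length = 26 →
    pvA1 cs arr = (List.range 26).map (fun i => arr.getD i 0 + (cs.count (Char.ofNat (97 + i)) : Int)) := by
  induction cs with
  | nil =>
    intro arr hlen
    simp only [pvA1, List.count_nil]
    refine List.ext_getElem (by simp [hlen]) ?_
    intro i h1 h2
    simp [List.getElem_map, List.getElem_range, hlen,
      show i < 26 by simpa [hlen] using h1]
  | cons c rest ih =>
    intro arr hlen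
    by_cases hc : c ∈ pvKbd
    · have hb : PySem.Chars.isIn [c] pvKbd = true := (pvIsIn_singleton c pvKbd).2 hc
      have hbd := (pvMem_kbd c).1 hc
      set n : Nat := c.toNat - 97 with hn
      have hn26 : n < 26 := by omega
      have hcast : (c.toNat : Int) - 97 = ((n : Nat) : Int) := by omega
      have hceq : c = Char.ofNat (97 + n) := by
        have := pvToNat_ofNat n hn26
        have h2 : (Char.ofNat (97 + n)) = Char.ofNat c.toNat := by congr 1; omega
        rw [h2, Char.ofNat_toNat]
      rw [show pvA1 (c :: rest) arr
            = pvA1 rest (PySem.List.pySetD arr ((c.toNat : Int) - 97)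
                (PySem.List.pyGetD arr ((c.toNat : Int) - 97) 0 + 1)) by
            simp [pvA1, hb]]
      rw [hcast, PySem.List.pySetD_natCast, PySem.List.pyGetD_natCast]
      rw [ih _ (by simp [hlen])]
      refine List.map_congr_left ?_
      intro i hi
      have hi26 : i < 26 := List.mem_range.1 hi
      by_cases hin : i = n
      · subst hin
        have hset : (arr.set n (arr.getD n 0 + 1)).getD n 0 = arr.getD n 0 + 1 := by
          rw [List.getD_eq_getElem _ _ (by simp [hlen]; omega), List.getElem_set_self,
            List.getD_eq_getElem _ _ (by omega)]
        rw [hset, List.count_cons, hceq]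
        simp
        ring
      · have hset : (arr.set n (arr.getD n 0 + 1)).getD i 0 = arr.getD i 0 := by
          by_cases hilen : i < arr.length
          · rw [List.getD_eq_getElem _ _ (by simpa using hilen),
              List.getElem_set_ne (by omega), List.getD_eq_getElem _ _ hilen]
          · omega
        have hne : Char.ofNat (97 + i) ≠ c := by
          intro h
          have : (Char.ofNat (97 + i)).toNat = c.toNat := by rw [h]
          rw [pvToNat_ofNat i hi26] at this
          omega
        have hne' : ¬ c = Char.ofNat (97 + i) := fun h => hne h.symm
        rw [hset, List.count_cons]
        simp [hne']
    · have hb : PySem.Chars.isIn [c] pvKbd = false := by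
        by_contra h
        exact hc ((pvIsIn_singleton c pvKbd).1 (by simpa using h))
      rw [show pvA1 (c :: rest) arr = pvA1 rest arr by simp [pvA1, hb]]
      rw [ih _ hlen]
      refine List.map_congr_left ?_
      intro i hi
      have hi26 : i < 26 := List.mem_range.1 hi
      have hne : Char.ofNat (97 + i) ≠ c := by
        intro h; exact hc (h ▸ pvOfNat_mem_kbd i hi26)
      have hne' : ¬ c = Char.ofNat (97 + i) := fun h => hne h.symm
      rw [List.count_cons]
      simp [hne']

-- A's positional loop writes the first 26 filtered letter codes over arr starting at k
lemma pvA2_eq (cs : List Char) : ∀ (arr : List Int) (k : Nat), arr.length = 26 → k < 26 →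
    pvA2 cs arr (k : Int) =
      arr.take k
        ++ ((cs.filter (fun c => PySem.Chars.isIn [c] pvKbd)).map (fun c => (c.toNat : Int) - 97)).take (26 - k)
        ++ arr.drop (k + min ((cs.filter (fun c => PySem.Chars.isIn [c] pvKbd)).map (fun c => (c.toNat : Int) - 97)).length (26 - k)) := by
  induction cs with
  | nil =>
    intro arr k hlen hk
    simp [pvA2]
  | cons c rest ih =>
    intro arr k hlen hk
    by_cases hb : PySem.Chars.isIn [c] pvKbd = true
    · have hfil : (c :: rest).filter (fun c => PySem.Chars.isIn [c] pvKbd)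
          = c :: rest.filter (fun c => PySem.Chars.isIn [c] pvKbd) := by
        simp [hb]
      rw [show pvA2 (c :: rest) arr (k : Int)
            = (if (k : Int) + 1 = 26 then PySem.List.pySetD arr (k : Int) ((c.toNat : Int) - 97)
               else pvA2 rest (PySem.List.pySetD arr (k : Int) ((c.toNat : Int) - 97)) ((k : Int) + 1)) by
            simp [pvA2, hb]]
      rw [PySem.List.pySetD_natCast, hfil]
      set v : Int := (c.toNat : Int) - 97 with hv
      set vs := rest.filter (fun c => PySem.Chars.isIn [c] pvKbd) with hvs
      have hset : arr.set k v = arr.take k ++ v :: arr.drop (k + 1) :=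
        List.set_eq_take_cons_drop v (by omega)
      by_cases h26 : k = 25
      · subst h26
        rw [if_pos (by norm_num)]
        rw [hset]
        have : arr.drop 26 = [] := by
          apply List.drop_eq_nil_of_le; omega
        simp [List.map_cons, this]
        omega
      · rw [if_neg (by omega)]
        rw [show (k : Int) + 1 = ((k + 1 : Nat) : Int) by push_cast; ring]
        rw [ih _ (k + 1) (by simp [hlen]) (by omega)]
        have htake : (arr.set k v).take (k + 1) = arr.take k ++ [v] := by
          rw [hset, show k + 1 = (arr.take k).length + 1 by simp [List.length_take]; omega]
          simp [List.take_append]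
        have hdrop : ∀ m, k + 1 ≤ m → (arr.set k v).drop m = arr.drop m := by
          intro m hm
          exact List.drop_set_of_lt (by omega)
        rw [htake, hdrop _ (by omega)]
        have h1 : (v :: vs.map (fun c => (c.toNat : Int) - 97)).take (26 - k)
            = v :: (vs.map (fun c => (c.toNat : Int) - 97)).take (26 - (k + 1)) := by
          rw [show 26 - k = (26 - (k + 1)) + 1 by omega, List.take_succ_cons]
        rw [List.map_cons, h1]
        have h2 : k + 1 + min (vs.map (fun c => (c.toNat : Int) - 97)).length (26 - (k + 1))
            = k + min (v :: vs.map (fun c => (c.toNat : Int) - 97)).length (26 - k) := by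
          simp [List.length_cons]; omega
        rw [h2]
        simp [List.append_assoc]
    · have hfil : (c :: rest).filter (fun c => PySem.Chars.isIn [c] pvKbd)
          = rest.filter (fun c => PySem.Chars.isIn [c] pvKbd) := by
        simp [Bool.eq_false_iff.2 hb]
      rw [show pvA2 (c :: rest) arr (k : Int) = pvA2 rest arr (k : Int) by
            simp [pvA2, Bool.eq_false_iff.2 hb]]
      rw [ih _ k hlen hk, hfil]

-- the skip loop factors through filter: filtering cs = filtering what skip returns
lemma pvSkip_filter (cs : List Char) :
    cs.filter (fun c => PySem.Chars.isIn [c] pvKbd)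
      = (pvSkip cs).filter (fun c => PySem.Chars.isIn [c] pvKbd) := by
  induction cs with
  | nil => rfl
  | cons c rest ih =>
    by_cases hb : PySem.Chars.isIn [c] pvKbd = true
    · simp [pvSkip, hb]
    · simp only [pvSkip, List.filter_cons, hb]
      simp only [Bool.false_eq_true, if_false]
      exact ih

-- skip returns either [] or a list starting with a valid char
lemma pvSkip_cases (cs : List Char) :
    pvSkip cs = [] ∨ ∃ c rest, pvSkip cs = c :: rest ∧ PySem.Chars.isIn [c] pvKbd = true := by
  induction cs with
  | nil => exact Or.inl rfl
  | cons c rest ih =>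
    by_cases hb : PySem.Chars.isIn [c] pvKbd = true
    · exact Or.inr ⟨c, rest, by simp [pvSkip, hb], hb⟩
    · simpa [pvSkip, hb] using ih

-- B's recursive builder equals: first n filtered letter codes, then zeros to length n
lemma pvFill_eq : ∀ (n : Nat) (cs : List Char),
    pvFill cs n =
      ((cs.filter (fun c => PySem.Chars.isIn [c] pvKbd)).map (fun c => (c.toNat : Int) - 97)).take n
        ++ List.replicate (n - (cs.filter (fun c => PySem.Chars.isIn [c] pvKbd)).length) 0 := by
  intro n
  induction n with
  | zero => intro cs; simp [pvFill]
  | succ m ih =>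
    intro cs
    rw [pvSkip_filter cs]
    rcases pvSkip_cases cs with h | ⟨c, rest, h, hb⟩
    · simp [pvFill, h]
    · rw [show pvFill cs (m + 1) = ((c.toNat : Int) - 97) :: pvFill rest m by
          simp [pvFill, h]]
      rw [h]
      simp only [List.filter_cons, hb, if_true, List.map_cons, List.take_succ_cons,
        List.length_cons, Nat.succ_sub_succ]
      rw [ih rest, List.cons_append]

-- ===== VERDICT (by name: the statement is the Claim_ definition above) =====
theorem generate_vector_spec : Claim_equal_generate_vector := by
  intro word type _
  unfold Spec_generate_vector generate_vector generate_vector_alt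
  set cs := word.toList with hcs
  by_cases ht : type = 1
  · rw [if_pos ht, if_pos ht]
    rw [pvA1_eq cs (List.replicate 26 0) (by simp)]
    rw [show (26 : Int) = ((26 : Nat) : Int) from rfl, PySem.List.pyRange_zero_natCast,
      List.map_map]
    refine List.map_congr_left ?_
    intro i hi
    have hi26 : i < 26 := List.mem_range.1 hi
    simp only [Function.comp_apply, PySem.List.count_eq]
    have hrep : (List.replicate 26 (0 : Int)).getD i 0 = 0 := by
      rw [List.getD_eq_getElem _ _ (by simpa using hi26), List.getElem_replicate]
    have hch : (97 + ((i : Nat) : Int)).toNat = 97 + i := by omega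
    rw [hrep, hch]
    simp
  · rw [if_neg ht, if_neg ht]
    have h := pvA2_eq cs (List.replicate 26 0) 0 (by simp) (by omega)
    simp only [Nat.cast_zero] at h
    rw [h, pvFill_eq 26 cs]
    simp only [List.take_zero, List.nil_append, Nat.sub_zero, Nat.zero_add,
      List.drop_replicate, List.length_map]
    congr 1
    congr 1
    omega
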